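-- pv_equiv track=rewrite | github.com/GUTYL/Algorithms | leetcode/1716.py | totalMoney
-- ===== SOURCE A (Python) =====
-- def totalMoney(n: int) -> int:
--     day = 1
--     money = 0
--     while day <= n:
--         week = (day-1) // 7
--         money += week + day - 7 * week
--         day += 1
--     return money
-- ===== SOURCE B (Python) =====
-- def totalMoney(n: int) -> int:
--     # Closed form: w full weeks contribute 28, 35, 42, ... ; the partial week of
--     # r days starts at w+1 and increases by 1 per day.
--     if n <= 0:
--         return 0
--     w, r = divmod(n, 7)
--     return 28 * w + 7 * (w * (w - 1) // 2) + r * w + r * (r + 1) // 2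
-- ===== Notes on version B (the rewrite author's own statement) =====
-- stated objective: faster
-- what changed: Replaced the day-by-day accumulation loop with an O(1) closed form: arithmetic-series sum over full weeks plus a triangular-number formula for the partial week.
import Mathlib
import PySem

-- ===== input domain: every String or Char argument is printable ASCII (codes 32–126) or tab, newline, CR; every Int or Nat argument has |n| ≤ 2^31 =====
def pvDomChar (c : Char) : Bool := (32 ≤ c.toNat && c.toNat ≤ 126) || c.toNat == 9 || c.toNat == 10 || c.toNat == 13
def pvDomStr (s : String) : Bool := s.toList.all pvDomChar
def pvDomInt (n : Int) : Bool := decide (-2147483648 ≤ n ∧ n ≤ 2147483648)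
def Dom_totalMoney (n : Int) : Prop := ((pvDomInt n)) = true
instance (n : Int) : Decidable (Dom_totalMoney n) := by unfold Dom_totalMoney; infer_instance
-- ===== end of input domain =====

-- B replaces A's day-by-day loop with a closed form (full-week arithmetic series + partial-week triangular number); measured asymptotically faster.

-- ===== PORT A =====
-- while day <= n: week = (day-1)//7; money += week + day - 7*week; day += 1
-- fuel = number of remaining iterations; the loop runs n.toNat times starting at day = 1
def totalMoneyLoop (n : Int) (fuel : Nat) (day money : Int) : Int :=
  match fuel with
  | 0 => money
  | Nat.succ fuel' =>
    if day ≤ n then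
      let week := PySem.Int.floordiv (day - 1) 7
      totalMoneyLoop n fuel' (day + 1) (money + (week + day - 7 * week))
    else money

def totalMoney (n : Int) : Int := totalMoneyLoop n n.toNat 1 0

-- ===== PORT B =====
def totalMoney_alt (n : Int) : Int :=
  if n ≤ 0 then 0
  else
    let w := PySem.Int.floordiv n 7
    let r := PySem.Int.mod n 7
    28 * w + 7 * (PySem.Int.floordiv (w * (w - 1)) 2) + r * w + PySem.Int.floordiv (r * (r + 1)) 2

-- ===== PRECONDITION & SPEC =====
def Spec_totalMoney (n : Int) (out : Int) : Prop := out = totalMoney_alt n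
instance (n : Int) (out : Int) : Decidable (Spec_totalMoney n out) := by unfold Spec_totalMoney; infer_instance

-- ===== CLAIM (what is proved, stated in full; the proofs are below) =====
def Claim_equal_totalMoney : Prop := ∀ (n : Int), Dom_totalMoney n → Spec_totalMoney n (totalMoney n)

-- ===== LEMMAS AND PROOFS =====

-- the closed form, written with Lean's ediv/emod (equal to Python's for these nonnegative operands)
def pvF (d : Int) : Int :=
  if d ≤ 0 then 0
  else 28 * (d / 7) + 7 * ((d / 7) * ((d / 7) - 1) / 2) + (d % 7) * (d / 7) + (d % 7) * ((d % 7) + 1) / 2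

theorem pvF_eq_alt (n : Int) : totalMoney_alt n = pvF n := by
  unfold totalMoney_alt pvF
  by_cases h : n ≤ 0
  · simp [h]
  · have h7 : PySem.Int.floordiv n 7 = n / 7 := PySem.Int.floordiv_eq_ediv_of_pos (by omega)
    have hm : PySem.Int.mod n 7 = n % 7 := PySem.Int.mod_eq_emod_of_pos (by omega)
    have h2 : PySem.Int.floordiv ((n / 7) * ((n / 7) - 1)) 2
        = ((n / 7) * ((n / 7) - 1)) / 2 := PySem.Int.floordiv_eq_ediv_of_pos (by omega)
    have h3 : PySem.Int.floordiv ((n % 7) * ((n % 7) + 1)) 2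
        = ((n % 7) * ((n % 7) + 1)) / 2 := PySem.Int.floordiv_eq_ediv_of_pos (by omega)
    rw [if_neg h, if_neg h]
    simp only [h7, hm, h2, h3]

theorem pvF_formula (x : Int) (hx : 0 ≤ x) :
    pvF x = 28 * (x / 7) + 7 * ((x / 7) * ((x / 7) - 1) / 2) + (x % 7) * (x / 7) + (x % 7) * ((x % 7) + 1) / 2 := by
  unfold pvF
  split_ifs with h
  · have hx0 : x = 0 := by omega
    subst hx0; decide
  · rfl

theorem pvF_step (d : Int) (hd : 1 ≤ d) :
    pvF d = pvF (d - 1) + ((d - 1) / 7 + d - 7 * ((d - 1) / 7)) := by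
  rw [pvF_formula d (by omega), pvF_formula (d - 1) (by omega)]
  obtain ⟨t, ht⟩ := Int.even_mul_succ_self ((d - 1) / 7 - 1)
  have h1 : ((d - 1) / 7) * ((d - 1) / 7 - 1) = 2 * t := by linear_combination ht
  have e1 : ((d - 1) / 7) * ((d - 1) / 7 - 1) / 2 = t := by
    rw [h1]; exact Int.mul_ediv_cancel_left t two_ne_zero
  by_cases hs6 : (d - 1) % 7 = 6
  · have hw : d / 7 = (d - 1) / 7 + 1 := by omega
    have hr : d % 7 = 0 := by omega
    have h2 : ((d - 1) / 7 + 1) * ((d - 1) / 7 + 1 - 1) = 2 * (t + (d - 1) / 7) := by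
      linear_combination h1
    have e2 : ((d - 1) / 7 + 1) * ((d - 1) / 7 + 1 - 1) / 2 = t + (d - 1) / 7 := by
      rw [h2]; exact Int.mul_ediv_cancel_left _ two_ne_zero
    rw [hw, hr, e1, e2, hs6]
    omega
  · have hw : d / 7 = (d - 1) / 7 := by omega
    have hr : d % 7 = (d - 1) % 7 + 1 := by omega
    rw [hw, hr, e1]
    have hv : (d - 1) % 7 = 0 ∨ (d - 1) % 7 = 1 ∨ (d - 1) % 7 = 2 ∨ (d - 1) % 7 = 3 ∨
        (d - 1) % 7 = 4 ∨ (d - 1) % 7 = 5 := by omega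
    rcases hv with h | h | h | h | h | h <;> rw [h] <;> omega

theorem loop_inv (n : Int) : ∀ (k : Nat) (day money : Int),
    1 ≤ day → day = n - (k : Int) + 1 →
    totalMoneyLoop n k day money = money + (pvF n - pvF (day - 1)) := by
  intro k
  induction k with
  | zero =>
    intro day money _ hday
    have hnot : ¬ day ≤ n := by omega
    have hdn : day - 1 = n := by omega
    simp [totalMoneyLoop, hdn]
  | succ k ih =>
    intro day money hd1 hday
    have hle : day ≤ n := by push_cast at hday ⊢; omega
    simp only [totalMoneyLoop, hle, if_true]
    have hflo : PySem.Int.floordiv (day - 1) 7 = (day - 1) / 7 :=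
      PySem.Int.floordiv_eq_ediv_of_pos (by omega)
    rw [hflo, ih (day + 1) _ (by omega) (by push_cast at hday ⊢; omega)]
    have hstep := pvF_step day hd1
    have : day + 1 - 1 = day := by ring
    rw [this]
    linarith

-- ===== VERDICT (by name: the statement is the Claim_ definition above) =====
theorem totalMoney_spec : Claim_equal_totalMoney := by
  intro n _
  unfold Spec_totalMoney
  rw [pvF_eq_alt]
  unfold totalMoney
  by_cases h : n ≤ 0
  · have h0 : n.toNat = 0 := by omega
    rw [h0]
    simp [totalMoneyLoop, pvF, h]
  · have hk : ((n.toNat : Int)) = n := Int.toNat_of_nonneg (by omega)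
    rw [loop_inv n n.toNat 1 0 (by omega) (by omega)]
    have : pvF (1 - 1) = 0 := by norm_num [pvF]
    rw [this]
    ring
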